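-- pv_equiv track=rewrite | github.com/wzwzeyal/nlp_utils_repo | nlp_utils.py | consolidate_k_chars
-- ===== SOURCE A (Python) =====
-- def consolidate_k_chars(text, k):
--     while True:
--         count = 0
--         chars = set(text)
--         for c in chars:
--             if c * k in text:
--                 text = text.replace(c * k, c)
--                 count += 1
--         if count == 0:
--             break
--     return text
-- ===== SOURCE B (Python) =====
-- def consolidate_k_chars(text, k):
--     # Single run-length scan: a maximal run of length L collapses, after
--     # iterating L -> L//k + L%k to a fixpoint, to 1 + (L-1) % (k-1) chars.
--     out = []
--     i = 0
--     n = len(text)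
--     while i < n:
--         j = i
--         while j < n and text[j] == text[i]:
--             j += 1
--         L = j - i
--         out.append(text[i] * (1 + (L - 1) % (k - 1)))
--         i = j
--     return ''.join(out)
-- ===== Notes on version B (the rewrite author's own statement) =====
-- stated objective: alternative
-- what changed: Replaces the fixpoint loop of repeated str.replace passes over the whole string (once per distinct character, until stable) by a single run-length scan that emits each maximal run of length L as 1+(L-1)%(k-1) characters, the closed form of the fixpoint of iterating L -> L//k + L%k.
import Mathlib
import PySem

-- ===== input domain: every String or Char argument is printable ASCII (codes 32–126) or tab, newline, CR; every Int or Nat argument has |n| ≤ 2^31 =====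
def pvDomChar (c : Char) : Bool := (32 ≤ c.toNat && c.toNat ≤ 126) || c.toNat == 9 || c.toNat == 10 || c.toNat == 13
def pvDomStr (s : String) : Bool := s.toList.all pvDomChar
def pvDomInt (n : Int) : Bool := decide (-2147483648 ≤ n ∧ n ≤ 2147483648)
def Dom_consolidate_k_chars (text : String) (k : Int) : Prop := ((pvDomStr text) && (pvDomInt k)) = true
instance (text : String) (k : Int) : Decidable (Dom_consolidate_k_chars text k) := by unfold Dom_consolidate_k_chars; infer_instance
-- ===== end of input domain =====

-- B replaces A's fixpoint loop of whole-string replace passes by one run-length scan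
-- (each maximal run of length L becomes 1+(L-1)%(k-1) chars); return values agree on Pre_.

-- ===== PORT A =====
-- one outer `while True` iteration: `for c in set(text): if c*k in text: text = text.replace(c*k, c); count += 1`
def pvAStep (k : Int) (l : List Char) : List Char × Nat :=
  (PySem.Set.ofList l).foldl
    (fun st c =>
      if PySem.Chars.isIn (PySem.List.pyRepeat [c] k) st.1
      then (PySem.Chars.replace st.1 (PySem.List.pyRepeat [c] k) [c], st.2 + 1)
      else st)
    (l, 0)

-- the `while True` loop; fuel only makes it total (each productive pass shortens the text when 2 ≤ k)
def pvALoop (k : Int) (fuel : Nat) (l : List Char) : List Char :=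
  match fuel with
  | 0 => l
  | fuel + 1 =>
    let st := pvAStep k l
    if st.2 = 0 then l else pvALoop k fuel st.1

def consolidate_k_chars (text : String) (k : Int) : String :=
  String.ofList (pvALoop k (text.toList.length + 1) text.toList)

-- ===== PORT B =====
-- `text[i] * (1 + (L - 1) % (k - 1))` for a maximal run of length L
def pvEmit (k : Int) (c : Char) (L : Nat) : List Char :=
  List.replicate (1 + PySem.Int.mod ((L : Int) - 1) (k - 1)).toNat c

-- the outer `while i < n` scan; the inner `while` advancing j over the run is takeWhile/dropWhile
def pvBGo (k : Int) : List Char → List Char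
  | [] => []
  | c :: t =>
    pvEmit k c (t.takeWhile (· == c)).length.succ ++ pvBGo k (t.dropWhile (· == c))
termination_by l => l.length
decreasing_by
  simpa using Nat.lt_succ_of_le (List.length_dropWhile_le (· == c) t)

def consolidate_k_chars_alt (text : String) (k : Int) : String :=
  String.ofList (pvBGo k text.toList)

-- ===== PRECONDITION & SPEC =====
-- Pre_ excludes exactly the inputs on which A never returns: for k ≤ 1 and nonempty text the
-- Python loop runs forever (k = 1 replaces c by c forever; k ≤ 0 makes c*k = '' which always matches).
def Pre_consolidate_k_chars (text : String) (k : Int) : Prop := text = "" ∨ 2 ≤ k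
instance (text : String) (k : Int) : Decidable (Pre_consolidate_k_chars text k) := by
  unfold Pre_consolidate_k_chars; infer_instance

def pvWitness_consolidate_k_chars : String × Int := ("aabbbbz", 2)

def Spec_consolidate_k_chars (text : String) (k : Int) (out : String) : Prop := out = consolidate_k_chars_alt text k
instance (text : String) (k : Int) (out : String) : Decidable (Spec_consolidate_k_chars text k out) := by unfold Spec_consolidate_k_chars; infer_instance

-- ===== CLAIM (what is proved, stated in full; the proofs are below) =====
def Claim_equal_consolidate_k_chars : Prop := ∀ (text : String) (k : Int), Dom_consolidate_k_chars text k → Pre_consolidate_k_chars text k → Spec_consolidate_k_chars text k (consolidate_k_chars text k)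

-- ===== LEMMAS AND PROOFS =====

-- `text.replace(c*k, c)` written as structural recursion (old = c :: os, new = [c])
def pvRep (c : Char) (os : List Char) : List Char → List Char
  | [] => []
  | d :: t =>
    if (c :: os).isPrefixOf (d :: t) then c :: pvRep c os ((d :: t).drop (os.length + 1))
    else d :: pvRep c os t
termination_by l => l.length
decreasing_by
  all_goals simp [List.length_drop]

lemma pvRep_go (c : Char) (os : List Char) :
    ∀ fuel l acc, l.length ≤ fuel →
      PySem.Chars.replace.go (c :: os) [c] fuel l acc = acc.reverse ++ pvRep c os l := by
  intro fuel
  induction fuel with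
  | zero =>
    intro l acc h
    have : l = [] := by cases l <;> simp_all
    subst this
    simp [PySem.Chars.replace.go, pvRep]
  | succ fuel ih =>
    intro l acc h
    cases l with
    | nil => simp [PySem.Chars.replace.go, pvRep]
    | cons d t =>
      by_cases hp : (c :: os).isPrefixOf (d :: t) = true
      · rw [pvRep, if_pos hp, PySem.Chars.replace.go, if_pos hp]
        rw [ih _ _ (by simp at h ⊢; omega)]
        simp
      · rw [pvRep, if_neg hp, PySem.Chars.replace.go, if_neg hp]
        rw [ih t (d :: acc) (by simp at h ⊢; omega)]
        simp

lemma pvReplace_eq (c : Char) (os l : List Char) :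
    PySem.Chars.replace l (c :: os) [c] = pvRep c os l := by
  rw [PySem.Chars.replace]
  simp only [List.isEmpty_cons, if_false, Bool.false_eq_true]
  simpa using pvRep_go c os l.length l [] le_rfl

lemma runSplit (c0 : Char) (t : List Char) :
    t = List.replicate (t.takeWhile (· == c0)).length c0 ++ t.dropWhile (· == c0) := by
  conv_lhs => rw [← List.takeWhile_append_dropWhile (p := (· == c0)) (l := t)]
  congr 1
  apply List.eq_replicate_of_mem
  intro b hb
  simpa using List.mem_takeWhile_imp hb

lemma dropWhile_head_ne (c0 : Char) (t : List Char) :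
    ∀ d ∈ (t.dropWhile (· == c0)).head?, d ≠ c0 := by
  intro d hd
  induction t with
  | nil => simp at hd
  | cons a t ih =>
    rw [List.dropWhile_cons] at hd
    by_cases h : (a == c0) = true
    · rw [if_pos h] at hd; exact ih hd
    · rw [if_neg h] at hd
      simp at hd h
      subst hd; exact h

lemma prefix_run (kk : Nat) (c : Char) (L : Nat) (r : List Char)
    (hr : ∀ d ∈ r.head?, d ≠ c) :
    (List.replicate kk c).isPrefixOf (List.replicate L c ++ r) = true ↔ kk ≤ L := by
  rw [List.isPrefixOf_iff_prefix]
  constructor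
  · intro h
    by_contra hLk
    push Not at hLk
    obtain ⟨s, hs⟩ := h
    have h1 : (List.replicate kk c ++ s)[L]? = some c := by
      rw [List.getElem?_append_left (by simpa using hLk)]
      simp [hLk]
    rw [hs, List.getElem?_append_right (by simp)] at h1
    simp at h1
    cases r with
    | nil => simp at h1
    | cons d t => simp at h1; exact hr d (by simp) h1
  · intro h
    refine List.IsPrefix.trans ⟨List.replicate (L - kk) c, ?_⟩ (List.prefix_append _ _)
    rw [← List.replicate_add]; congr 1; omega

lemma replicate_cons_eq (kk : Nat) (hk : 1 ≤ kk) (c : Char) :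
    List.replicate kk c = c :: List.replicate (kk - 1) c := by
  have : kk = (kk - 1) + 1 := by omega
  rw [this]; rfl

lemma pvRep_run_ne (kk : Nat) (c c0 : Char) (hne : c0 ≠ c) :
    ∀ L r, pvRep c (List.replicate (kk - 1) c) (List.replicate L c0 ++ r)
      = List.replicate L c0 ++ pvRep c (List.replicate (kk - 1) c) r := by
  intro L
  induction L with
  | zero => simp
  | succ L ih =>
    intro r
    have hp : ¬ ((c :: List.replicate (kk - 1) c).isPrefixOf
        (c0 :: (List.replicate L c0 ++ r)) = true) := by
      rw [List.isPrefixOf_iff_prefix]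
      simp only [List.cons_prefix_cons]
      rintro ⟨h, -⟩
      exact hne h.symm
    calc pvRep c (List.replicate (kk - 1) c) (List.replicate (L + 1) c0 ++ r)
        = pvRep c (List.replicate (kk - 1) c) (c0 :: (List.replicate L c0 ++ r)) := by
          simp [List.replicate_succ]
      _ = c0 :: pvRep c (List.replicate (kk - 1) c) (List.replicate L c0 ++ r) := by
          rw [pvRep, if_neg hp]
      _ = List.replicate (L + 1) c0 ++ pvRep c (List.replicate (kk - 1) c) r := by
          rw [ih r]; simp [List.replicate_succ]

lemma pvRep_run (kk : Nat) (hk : 2 ≤ kk) (c : Char) :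
    ∀ L r, (∀ d ∈ r.head?, d ≠ c) →
      pvRep c (List.replicate (kk - 1) c) (List.replicate L c ++ r)
        = List.replicate (L / kk + L % kk) c ++ pvRep c (List.replicate (kk - 1) c) r := by
  intro L
  induction L using Nat.strong_induction_on with
  | _ L ih =>
    intro r hr
    rcases Nat.eq_zero_or_pos L with hL0 | hL1
    · subst hL0; simp
    have hcons : List.replicate L c ++ r = c :: (List.replicate (L - 1) c ++ r) := by
      rw [replicate_cons_eq L hL1]; rfl
    by_cases hkL : kk ≤ L
    · have hpre : ((c :: List.replicate (kk - 1) c).isPrefixOf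
          (c :: (List.replicate (L - 1) c ++ r)) = true) := by
        rw [← replicate_cons_eq kk (by omega), ← hcons]
        exact (prefix_run kk c L r hr).mpr hkL
      rw [hcons, pvRep, if_pos hpre]
      have hdrop : (c :: (List.replicate (L - 1) c ++ r)).drop
          ((List.replicate (kk - 1) c).length + 1) = List.replicate (L - kk) c ++ r := by
        rw [List.length_replicate, List.drop_succ_cons,
          show (L - 1 : Nat) = (kk - 1) + (L - kk) by omega, List.replicate_add,
          List.append_assoc, List.drop_left' (by simp)]
      rw [hdrop, ih (L - kk) (by omega) r hr]
      have hdiv : (L - kk) / kk = L / kk - 1 := by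
        rw [show L - kk = L - kk * 1 by omega, Nat.sub_mul_div]
      have hmod : (L - kk) % kk = L % kk := (Nat.mod_eq_sub_mod hkL).symm
      have hq1 : 1 ≤ L / kk := (Nat.one_le_div_iff (by omega)).mpr hkL
      have : L / kk + L % kk = ((L - kk) / kk + (L - kk) % kk) + 1 := by omega
      rw [this]
      simp [List.replicate_succ]
    · have hpre : ¬ ((c :: List.replicate (kk - 1) c).isPrefixOf
          (c :: (List.replicate (L - 1) c ++ r)) = true) := by
        rw [← replicate_cons_eq kk (by omega), ← hcons]
        rw [prefix_run kk c L r hr]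
        omega
      rw [hcons, pvRep, if_neg hpre]
      rw [ih (L - 1) (by omega) r hr]
      rw [Nat.div_eq_of_lt (by omega), Nat.mod_eq_of_lt (by omega),
        Nat.div_eq_of_lt (by omega), Nat.mod_eq_of_lt (by omega)]
      simp only [Nat.zero_add]
      rw [replicate_cons_eq L hL1]
      simp

lemma q_pos (kk m : Nat) (hk : 2 ≤ kk) (hm : 1 ≤ m) : 1 ≤ m / kk + m % kk := by
  rcases Nat.lt_or_ge m kk with h | h
  · rw [Nat.mod_eq_of_lt h]; exact le_trans hm (Nat.le_add_left m (m / kk))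
  · have h1 : 1 ≤ m / kk := (Nat.one_le_div_iff (show 0 < kk by omega)).mpr h
    omega

lemma head?_pvRep (kk : Nat) (hk : 2 ≤ kk) (c : Char) (l : List Char) :
    (pvRep c (List.replicate (kk - 1) c) l).head? = l.head? := by
  cases l with
  | nil => simp [pvRep]
  | cons d t =>
    by_cases hdc : d = c
    · subst hdc
      have hts := runSplit d t
      have hr := dropWhile_head_ne d t
      conv_lhs => rw [hts]
      rw [show (d :: (List.replicate (t.takeWhile (· == d)).length d ++ t.dropWhile (· == d)))
            = List.replicate ((t.takeWhile (· == d)).length + 1) d ++ t.dropWhile (· == d) by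
          rw [List.replicate_succ]; rfl]
      rw [pvRep_run kk hk d _ _ hr]
      rw [replicate_cons_eq _ (q_pos kk _ hk (by omega))]
      simp
    · have hp : ¬ ((c :: List.replicate (kk - 1) c).isPrefixOf (d :: t) = true) := by
        rw [List.isPrefixOf_iff_prefix]
        simp only [List.cons_prefix_cons]
        rintro ⟨h, -⟩
        exact hdc h.symm
      rw [pvRep, if_neg hp]
      simp

lemma takeWhile_rep_append (c0 : Char) (m : Nat) (X : List Char)
    (hX : ∀ d ∈ X.head?, d ≠ c0) :
    (List.replicate m c0 ++ X).takeWhile (· == c0) = List.replicate m c0 ∧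
    (List.replicate m c0 ++ X).dropWhile (· == c0) = X := by
  induction m with
  | zero =>
    simp only [List.replicate_zero, List.nil_append]
    cases X with
    | nil => simp
    | cons d t =>
      have hd : ¬ ((d == c0) = true) := by simpa using hX d (by simp)
      rw [List.takeWhile_cons, List.dropWhile_cons, if_neg hd, if_neg hd]
      simp
  | succ m ih =>
    simp only [List.replicate_succ, List.cons_append, List.takeWhile_cons, List.dropWhile_cons]
    simp [ih.1, ih.2]

lemma pvBGo_run (k : Int) (c0 : Char) (L : Nat) (hL : 1 ≤ L) (X : List Char)
    (hX : ∀ d ∈ X.head?, d ≠ c0) :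
    pvBGo k (List.replicate L c0 ++ X) = pvEmit k c0 L ++ pvBGo k X := by
  obtain ⟨L', rfl⟩ : ∃ L', L = L' + 1 := ⟨L - 1, by omega⟩
  rw [List.replicate_succ, List.cons_append, pvBGo]
  rw [(takeWhile_rep_append c0 L' X hX).1, (takeWhile_rep_append c0 L' X hX).2]
  simp

lemma emit_eq (kk : Nat) (hk : 2 ≤ kk) (c : Char) (L : Nat) :
    pvEmit ((kk : Int)) c (L / kk + L % kk) = pvEmit ((kk : Int)) c L := by
  unfold pvEmit
  have hpos : (0 : Int) < (kk : Int) - 1 := by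
    have : (2 : Int) ≤ (kk : Int) := by exact_mod_cast hk
    omega
  rw [PySem.Int.mod_eq_emod_of_pos hpos, PySem.Int.mod_eq_emod_of_pos hpos]
  have hL' : L / kk + L % kk ≤ L := by
    have h1 := Nat.div_add_mod L kk
    have h2 : L / kk ≤ kk * (L / kk) := Nat.le_mul_of_pos_left _ (by omega)
    omega
  have hnat : L - (L / kk + L % kk) = (kk - 1) * (L / kk) := by
    have h1 := Nat.div_add_mod L kk
    have h3 : kk * (L / kk) = (kk - 1) * (L / kk) + L / kk := by
      obtain ⟨k', rfl⟩ : ∃ k', kk = k' + 1 := ⟨kk - 1, by omega⟩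
      simp [Nat.succ_mul]
    omega
  have hdvd : ((kk : Int) - 1) ∣ ((L : Int) - 1 - (((L / kk + L % kk : Nat) : Int) - 1)) := by
    refine ⟨((L / kk : Nat) : Int), ?_⟩
    have hc : ((L : Int)) - ((L / kk + L % kk : Nat) : Int) = (((kk - 1) * (L / kk) : Nat) : Int) := by
      rw [← hnat]; push_cast [hL']; ring
    rw [show (L : Int) - 1 - (((L / kk + L % kk : Nat) : Int) - 1)
          = (L : Int) - ((L / kk + L % kk : Nat) : Int) by ring, hc]
    rw [Nat.cast_mul, Nat.cast_sub (by omega)]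
    push_cast
    ring
  have key : (((L / kk + L % kk : Nat) : Int) - 1) % ((kk : Int) - 1)
      = ((L : Int) - 1) % ((kk : Int) - 1) := by
    rw [Int.emod_eq_emod_iff_emod_sub_eq_zero]
    apply Int.emod_eq_zero_of_dvd
    rw [show (((L / kk + L % kk : Nat) : Int) - 1) - ((L : Int) - 1)
          = -((L : Int) - 1 - (((L / kk + L % kk : Nat) : Int) - 1)) by ring]
    exact dvd_neg.mpr hdvd
  rw [key]

lemma alpha (kk : Nat) (hk : 2 ≤ kk) (c : Char) :
    ∀ l, pvBGo ((kk : Int)) (pvRep c (List.replicate (kk - 1) c) l) = pvBGo ((kk : Int)) l := by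
  suffices key : ∀ n l, l.length ≤ n →
      pvBGo ((kk : Int)) (pvRep c (List.replicate (kk - 1) c) l) = pvBGo ((kk : Int)) l from
    fun l => key l.length l le_rfl
  intro n
  induction n with
  | zero =>
    intro l h
    have : l = [] := by cases l <;> simp_all
    subst this; simp [pvRep]
  | succ n ihn =>
    intro l h
    cases l with
    | nil => simp [pvRep]
    | cons c0 t =>
      have hts := runSplit c0 t
      have hr := dropWhile_head_ne c0 t
      set L := (t.takeWhile (· == c0)).length + 1 with hLdef
      set r := t.dropWhile (· == c0) with hrdef
      have hl : c0 :: t = List.replicate L c0 ++ r := by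
        rw [hLdef, List.replicate_succ, List.cons_append, ← hts]
      have hrlen : r.length ≤ n := by
        have h1 : r.length ≤ t.length := List.length_dropWhile_le _ _
        simp at h
        omega
      rw [hl]
      by_cases hc : c0 = c
      · subst hc
        rw [pvRep_run kk hk c0 L r hr]
        have hQ : 1 ≤ L / kk + L % kk := q_pos kk L hk (by omega)
        have hX : ∀ d ∈ (pvRep c0 (List.replicate (kk - 1) c0) r).head?, d ≠ c0 := by
          rw [head?_pvRep kk hk c0 r]; exact hr
        rw [pvBGo_run _ c0 _ hQ _ hX, pvBGo_run _ c0 L (by omega) r hr]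
        rw [ihn r hrlen, emit_eq kk hk c0 L]
      · rw [pvRep_run_ne kk c c0 hc L r]
        have hX : ∀ d ∈ (pvRep c (List.replicate (kk - 1) c) r).head?, d ≠ c0 := by
          rw [head?_pvRep kk hk c r]; exact hr
        rw [pvBGo_run _ c0 _ (by omega) _ hX, pvBGo_run _ c0 L (by omega) r hr]
        rw [ihn r hrlen]

lemma beta (kk : Nat) (hk : 2 ≤ kk) :
    ∀ l, (∀ c0 ∈ l, PySem.Chars.isIn (List.replicate kk c0) l = false) →
      pvBGo ((kk : Int)) l = l := by
  suffices key : ∀ n l, l.length ≤ n →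
      (∀ c0 ∈ l, PySem.Chars.isIn (List.replicate kk c0) l = false) →
      pvBGo ((kk : Int)) l = l from fun l => key l.length l le_rfl
  intro n
  induction n with
  | zero =>
    intro l h _
    have : l = [] := by cases l <;> simp_all
    subst this; simp [pvBGo]
  | succ n ihn =>
    intro l hlen hno
    cases l with
    | nil => simp [pvBGo]
    | cons c0 t =>
      have hts := runSplit c0 t
      have hr := dropWhile_head_ne c0 t
      set L := (t.takeWhile (· == c0)).length + 1 with hLdef
      set r := t.dropWhile (· == c0) with hrdef
      have hl : c0 :: t = List.replicate L c0 ++ r := by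
        rw [hLdef, List.replicate_succ, List.cons_append, ← hts]
      have hrlen : r.length ≤ n := by
        have h1 : r.length ≤ t.length := List.length_dropWhile_le _ _
        simp at hlen
        omega
      have hLk : L < kk := by
        by_contra hge
        have hinf : List.replicate kk c0 <:+: (c0 :: t) := by
          rw [hl]
          refine List.IsPrefix.isInfix ?_
          refine List.IsPrefix.trans ⟨List.replicate (L - kk) c0, ?_⟩ (List.prefix_append _ _)
          rw [← List.replicate_add]; congr 1; omega
        have := hno c0 (by simp)
        rw [PySem.Chars.isIn_eq_false_iff] at this
        exact this hinf
      have hemit : pvEmit ((kk : Int)) c0 L = List.replicate L c0 := by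
        unfold pvEmit
        have hpos : (0 : Int) < (kk : Int) - 1 := by
          have : (2 : Int) ≤ (kk : Int) := by exact_mod_cast hk
          omega
        have hLk' : (L : Int) < (kk : Int) := by exact_mod_cast hLk
        rw [PySem.Int.mod_eq_emod_of_pos hpos,
          Int.emod_eq_of_lt (by omega) (by omega)]
        congr 1
        omega
      have hsub : ∀ c1 ∈ r, PySem.Chars.isIn (List.replicate kk c1) r = false := by
        intro c1 hc1
        by_contra hne
        have htrue : PySem.Chars.isIn (List.replicate kk c1) r = true := by
          cases hb : PySem.Chars.isIn (List.replicate kk c1) r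
          · exact absurd hb hne
          · rfl
        rw [PySem.Chars.isIn_iff_infix] at htrue
        have hinf : List.replicate kk c1 <:+: (c0 :: t) := by
          rw [hl]
          exact htrue.trans (List.suffix_append _ _).isInfix
        have hmem : c1 ∈ c0 :: t := by
          rw [hl]; exact List.mem_append_right _ hc1
        have := hno c1 hmem
        rw [PySem.Chars.isIn_eq_false_iff] at this
        exact this hinf
      rw [hl, pvBGo_run _ c0 L (by omega) r hr, hemit, ihn r hrlen hsub]

lemma pvRep_length_le (c : Char) (os : List Char) :
    ∀ l, (pvRep c os l).length ≤ l.length := by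
  suffices key : ∀ n l, l.length ≤ n → (pvRep c os l).length ≤ l.length from
    fun l => key l.length l le_rfl
  intro n
  induction n with
  | zero =>
    intro l h
    have : l = [] := by cases l <;> simp_all
    subst this; simp [pvRep]
  | succ n ihn =>
    intro l h
    cases l with
    | nil => simp [pvRep]
    | cons d t =>
      by_cases hp : (c :: os).isPrefixOf (d :: t) = true
      · rw [pvRep, if_pos hp]
        have h1 := ihn ((d :: t).drop (os.length + 1)) (by simp at h ⊢; omega)
        simp at h1 ⊢
        omega
      · rw [pvRep, if_neg hp]
        have h1 := ihn t (by simp at h; omega)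
        simp
        omega

lemma pvRep_length_lt (c : Char) (os : List Char) (hos : 1 ≤ os.length) :
    ∀ l, PySem.Chars.isIn (c :: os) l = true → (pvRep c os l).length < l.length := by
  suffices key : ∀ n l, l.length ≤ n → PySem.Chars.isIn (c :: os) l = true →
      (pvRep c os l).length < l.length from fun l => key l.length l le_rfl
  intro n
  induction n with
  | zero =>
    intro l h hin
    have : l = [] := by cases l <;> simp_all
    subst this
    rw [PySem.Chars.isIn_iff_infix, List.infix_nil] at hin
    simp at hin
  | succ n ihn =>
    intro l h hin
    cases l with
    | nil =>
      rw [PySem.Chars.isIn_iff_infix, List.infix_nil] at hin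
      simp at hin
    | cons d t =>
      by_cases hp : (c :: os).isPrefixOf (d :: t) = true
      · rw [pvRep, if_pos hp]
        have hlen : os.length + 1 ≤ t.length + 1 := by
          have := List.IsPrefix.length_le (List.isPrefixOf_iff_prefix.mp hp)
          simpa using this
        have h1 := pvRep_length_le c os ((d :: t).drop (os.length + 1))
        simp at h1 ⊢
        omega
      · rw [pvRep, if_neg hp]
        rw [PySem.Chars.isIn_iff_infix] at hin
        obtain ⟨pre, suf, hps⟩ := hin
        cases pre with
        | nil =>
          exfalso
          apply hp
          rw [List.isPrefixOf_iff_prefix]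
          exact ⟨suf, by simpa using hps⟩
        | cons x pre' =>
          have hinf : (c :: os) <:+: t := by
            refine ⟨pre', suf, ?_⟩
            have := hps
            simp only [List.cons_append] at this
            exact (List.cons.injEq _ _ _ _).mp this |>.2
          have h1 := ihn t (by simp at h; omega) (by rw [PySem.Chars.isIn_iff_infix]; exact hinf)
          simp
          omega

lemma fold_mono (k : Int) (cs : List Char) :
    ∀ st : List Char × Nat,
      st.2 ≤ (cs.foldl (fun st c =>
        if PySem.Chars.isIn (PySem.List.pyRepeat [c] k) st.1
        then (PySem.Chars.replace st.1 (PySem.List.pyRepeat [c] k) [c], st.2 + 1)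
        else st) st).2 := by
  induction cs with
  | nil => intro st; simp
  | cons c cs ih =>
    intro st
    rw [List.foldl_cons]
    refine le_trans ?_ (ih _)
    by_cases hin : PySem.Chars.isIn (PySem.List.pyRepeat [c] k) st.1 = true
    · rw [if_pos hin]; simp
    · rw [if_neg hin]

lemma fold_main (kk : Nat) (hk : 2 ≤ kk) (cs : List Char) :
    ∀ l0 n0,
      let res := cs.foldl (fun st c =>
        if PySem.Chars.isIn (PySem.List.pyRepeat [c] ((kk : Int))) st.1
        then (PySem.Chars.replace st.1 (PySem.List.pyRepeat [c] ((kk : Int))) [c], st.2 + 1)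
        else st) (l0, n0)
      pvBGo ((kk : Int)) res.1 = pvBGo ((kk : Int)) l0 ∧
      res.1.length ≤ l0.length ∧
      (res.2 = n0 → res.1 = l0 ∧ ∀ c ∈ cs, PySem.Chars.isIn (List.replicate kk c) l0 = false) ∧
      (res.2 ≠ n0 → res.1.length < l0.length) := by
  induction cs with
  | nil =>
    intro l0 n0
    refine ⟨rfl, le_rfl, fun _ => ⟨rfl, by simp⟩, fun h => absurd rfl h⟩
  | cons c cs ih =>
    intro l0 n0
    have hpat : PySem.List.pyRepeat [c] ((kk : Int)) = List.replicate kk c := by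
      rw [PySem.List.pyRepeat_singleton]
      simp
    simp only [List.foldl_cons, hpat]
    by_cases hin : PySem.Chars.isIn (List.replicate kk c) l0 = true
    · rw [if_pos hin]
      have hrepl : PySem.Chars.replace l0 (List.replicate kk c) [c]
          = pvRep c (List.replicate (kk - 1) c) l0 := by
        rw [replicate_cons_eq kk (by omega), pvReplace_eq]
      rw [hrepl]
      obtain ⟨ihA, ihB, _, _⟩ := ih (pvRep c (List.replicate (kk - 1) c) l0) (n0 + 1)
      have hmono := fold_mono ((kk : Int)) cs (pvRep c (List.replicate (kk - 1) c) l0, n0 + 1)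
      have hlt : (pvRep c (List.replicate (kk - 1) c) l0).length < l0.length := by
        apply pvRep_length_lt c _ (by simp; omega)
        rw [← replicate_cons_eq kk (by omega)]
        exact hin
      refine ⟨by rw [ihA, alpha kk hk c l0], le_trans ihB (le_of_lt hlt), ?_, ?_⟩
      · intro hcnt
        exfalso
        omega
      · intro _
        exact lt_of_le_of_lt ihB hlt
    · rw [if_neg hin]
      obtain ⟨ihA, ihB, ihC, ihD⟩ := ih l0 n0
      refine ⟨ihA, ihB, ?_, ihD⟩
      intro hcnt
      obtain ⟨h1, h2⟩ := ihC hcnt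
      refine ⟨h1, ?_⟩
      intro c' hc'
      rcases List.mem_cons.mp hc' with rfl | hmem
      · cases hb : PySem.Chars.isIn (List.replicate kk c') l0
        · rfl
        · exact absurd hb hin
      · exact h2 c' hmem

lemma step_main (kk : Nat) (hk : 2 ≤ kk) (l : List Char) :
    pvBGo ((kk : Int)) (pvAStep ((kk : Int)) l).1 = pvBGo ((kk : Int)) l ∧
    (pvAStep ((kk : Int)) l).1.length ≤ l.length ∧
    ((pvAStep ((kk : Int)) l).2 = 0 → (pvAStep ((kk : Int)) l).1 = l ∧
      ∀ c ∈ PySem.Set.ofList l, PySem.Chars.isIn (List.replicate kk c) l = false) ∧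
    ((pvAStep ((kk : Int)) l).2 ≠ 0 → (pvAStep ((kk : Int)) l).1.length < l.length) := by
  exact fold_main kk hk (PySem.Set.ofList l) l 0

lemma loop_eq (kk : Nat) (hk : 2 ≤ kk) :
    ∀ fuel l, l.length < fuel → pvALoop ((kk : Int)) fuel l = pvBGo ((kk : Int)) l := by
  intro fuel
  induction fuel with
  | zero => intro l h; omega
  | succ fuel ih =>
    intro l h
    obtain ⟨hA, hB, hC, hD⟩ := step_main kk hk l
    rw [pvALoop]
    by_cases hz : (pvAStep ((kk : Int)) l).2 = 0
    · rw [if_pos hz]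
      obtain ⟨hfix, hnone⟩ := hC hz
      have : ∀ c0 ∈ l, PySem.Chars.isIn (List.replicate kk c0) l = false := by
        intro c0 hc0
        exact hnone c0 ((PySem.Set.mem_ofList _ _).mpr hc0)
      exact (beta kk hk l this).symm
    · rw [if_neg hz]
      have hlt : (pvAStep ((kk : Int)) l).1.length < l.length := hD hz
      rw [ih _ (by omega), hA]

-- ===== VERDICT (by name: the statement is the Claim_ definition above) =====
theorem consolidate_k_chars_spec : Claim_equal_consolidate_k_chars := by
  intro text k _ hpre
  unfold Spec_consolidate_k_chars consolidate_k_chars consolidate_k_chars_alt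
  by_cases hk2 : 2 ≤ k
  · have hki : k = ((k.toNat : Nat) : Int) := (Int.toNat_of_nonneg (by omega)).symm
    have hk2' : 2 ≤ k.toNat := by omega
    rw [hki]
    congr 1
    exact loop_eq k.toNat hk2' _ text.toList (Nat.lt_succ_self _)
  · have htxt : text = "" := by
      rcases hpre with h | h
      · exact h
      · exact absurd h hk2
    subst htxt
    simp [pvALoop, pvAStep, pvBGo, PySem.Set.ofList]
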